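-- pv_equiv track=rewrite | github.com/cgvvxx/PS | ps/그리디/100_P_무지의먹방라이브.py | solution
-- ===== SOURCE A (Python) =====
-- def solution(food_times, k):
--
--     foods = [[idx, food_time] for idx, food_time in enumerate(food_times)]
--     foods.sort(key=lambda x:(x[1], x[0]))
--     len_food = len(foods)
--
--     before_del_num = 0
--     for i in range(len(foods)):
--
--         del_num = foods[i][1]
--         this_term = len_food * (del_num - before_del_num)
--
--         if k >= this_term:
--             k -= this_term
--             before_del_num = del_num
--             len_food -= 1
--         else:
--             break
--     else:
--         return -1
--
--     new_foods = foods[i:]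
--     new_foods.sort()
--
--     return new_foods[k % len(new_foods)][0] + 1
-- ===== SOURCE B (Python) =====
-- def solution(food_times, k):
--     # Parametric search: find the largest whole "level" L (seconds eaten from
--     # every surviving food) whose total cost sum(min(t, L)) still fits in k;
--     # no sorting of the foods at all.
--     if not food_times or k >= sum(food_times):
--         return -1
--     n = len(food_times)
--     lo = min(min(food_times), k // n)   # cost(lo) = n*lo <= k
--     hi = max(food_times)                # cost(hi) = sum > k
--     while hi - lo > 1:
--         mid = (lo + hi) // 2
--         if sum(min(t, mid) for t in food_times) <= k:
--             lo = mid
--         else: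
--             hi = mid
--     leftover = k - sum(min(t, lo) for t in food_times)
--     survivors = [j for j, t in enumerate(food_times) if t > lo]
--     return survivors[leftover % len(survivors)] + 1
-- ===== Notes on version B (the rewrite author's own statement) =====
-- stated objective: alternative
-- what changed: B never sorts the foods: it binary-searches the largest integer eating level L with sum(min(t,L)) <= k, recomputing that cost from scratch at each probe, then picks the (k-cost(L))-th survivor (foods with t > L) straight from enumerate in original index order - instead of A's sort by (time,index), forward round-consuming loop with mutable before/len_food, tail slice and second sort.
import Mathlib
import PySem

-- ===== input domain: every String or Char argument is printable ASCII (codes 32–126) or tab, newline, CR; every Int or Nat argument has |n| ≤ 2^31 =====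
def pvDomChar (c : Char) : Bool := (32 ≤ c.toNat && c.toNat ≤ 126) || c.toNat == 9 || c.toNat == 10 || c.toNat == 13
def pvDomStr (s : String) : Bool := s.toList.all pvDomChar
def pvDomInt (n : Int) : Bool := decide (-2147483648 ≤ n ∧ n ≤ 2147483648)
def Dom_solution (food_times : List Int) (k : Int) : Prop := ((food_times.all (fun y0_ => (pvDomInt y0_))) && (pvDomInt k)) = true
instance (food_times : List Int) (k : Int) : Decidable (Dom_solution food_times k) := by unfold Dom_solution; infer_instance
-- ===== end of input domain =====

-- B sorts nothing: it binary-searches the largest integer eating level L with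
-- sum(min(t,L)) ≤ k and reads the answer off the unsorted list (objective:
-- alternative algorithm, similar cost).

-- ===== PORT A =====
-- the Python for-loop over range(len(foods)) with break/else, as structural recursion
-- over the sorted list with the loop counter i carried along; returns some (i, k) on
-- break and none when the loop runs to completion (the for-else branch).
def solA_loop : List (Int × Int) → Int → Int → Int → Nat → Option (Nat × Int)
  | [], _, _, _, _ => none
  | fd :: rest, k, before, lenFood, i =>
    let delNum := fd.2
    let term := lenFood * (delNum - before)
    if k ≥ term then solA_loop rest (k - term) delNum (lenFood - 1) (i + 1)
    else some (i, k)

def solution (food_times : List Int) (k : Int) : Int :=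
  -- foods = [[idx, t] …] sorted by key (t, idx)
  let foods := PySem.List.sorted2 (PySem.List.enumerate food_times) (fun x => x.2) (fun x => x.1)
  match solA_loop foods k 0 (PySem.List.len foods) 0 with
  | none => -1
  | some (i, kk) =>
    -- new_foods = foods[i:]; new_foods.sort()  (lists compare lexicographically)
    let new_foods := PySem.List.sorted2 (foods.drop i) (fun x => x.1) (fun x => x.2)
    -- new_foods[kk % len(new_foods)][0] + 1; the index is provably in range, .getD is never taken
    ((PySem.List.pyGet? new_foods (PySem.Int.mod kk (PySem.List.len new_foods))).getD (0, 0)).1 + 1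

-- ===== PORT B =====
-- sum(min(t, L) for t in food_times): the generator sum as a left fold
def costB (ft : List Int) (L : Int) : Int := ft.foldl (fun a t => a + min t L) 0

-- while hi - lo > 1: mid = (lo + hi) // 2; move lo or hi
def bsearchB (ft : List Int) (k lo hi : Int) : Int :=
  if hi - lo > 1 then
    let mid := PySem.Int.floordiv (lo + hi) 2
    if costB ft mid ≤ k then bsearchB ft k mid hi else bsearchB ft k lo mid
  else lo
termination_by (hi - lo).toNat
decreasing_by
  all_goals
    simp only [PySem.Int.floordiv_eq_ediv_of_pos (by omega : (0:Int) < 2)] at *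
    omega

def solution_alt (food_times : List Int) (k : Int) : Int :=
  if food_times.isEmpty ∨ food_times.foldl (fun a t => a + t) 0 ≤ k then -1
  else
    let n := PySem.List.len food_times
    let lo := min ((PySem.List.min? food_times (fun x => x)).getD 0) (PySem.Int.floordiv k n)
    let hi := (PySem.List.max? food_times (fun x => x)).getD 0
    let L := bsearchB food_times k lo hi
    let leftover := k - costB food_times L
    let survivors := ((PySem.List.enumerate food_times).filter (fun x => decide (L < x.2))).map (fun x => x.1)
    (PySem.List.pyGet? survivors (PySem.Int.mod leftover (PySem.List.len survivors))).getD 0 + 1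

-- ===== PRECONDITION & SPEC =====
def Spec_solution (food_times : List Int) (k : Int) (out : Int) : Prop := out = solution_alt food_times k
instance (food_times : List Int) (k : Int) (out : Int) : Decidable (Spec_solution food_times k out) := by unfold Spec_solution; infer_instance

-- ===== CLAIM (what is proved, stated in full; the proofs are below) =====
def Claim_equal_solution : Prop := ∀ (food_times : List Int) (k : Int), Dom_solution food_times k → Spec_solution food_times k (solution food_times k)

-- ===== LEMMAS AND PROOFS =====

-- the lexicographic sort key (time, index) of A's first sort
def keyTI (x : Int × Int) : Lex (Int × Int) := toLex (x.2, x.1)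

-- A's sorted foods, expressed through PySem.List.sorted with a linearly ordered key
def sTI (ft : List Int) : List (Int × Int) := PySem.List.sorted (PySem.List.enumerate ft) keyTI

-- B's survivor index list at level L
def survB (ft : List Int) (L : Int) : List (Int × Int) :=
  (PySem.List.enumerate ft).filter (fun x => decide (L < x.2))

-- B's selection value at level L
def ansB (ft : List Int) (k L : Int) : Int :=
  (PySem.List.pyGet? ((survB ft L).map (fun x => x.1))
    (PySem.Int.mod (k - costB ft L) (PySem.List.len ((survB ft L).map (fun x => x.1))))).getD 0 + 1

-- a sort with a Python tuple key (k1, k2) is a sort by the lexicographic product key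
lemma sorted2_eq_sorted_lex {α : Type} (xs : List α) (k1 k2 : α → Int) (rev : Bool) :
    PySem.List.sorted2 xs k1 k2 rev = PySem.List.sorted xs (fun x => toLex (k1 x, k2 x)) rev := by
  unfold PySem.List.sorted2 PySem.List.sorted
  have h : (fun a b => decide (k1 a < k1 b) || (!decide (k1 b < k1 a) && decide (k2 a < k2 b)))
      = (fun a b => decide (toLex (k1 a, k2 a) < toLex (k1 b, k2 b))) := by
    funext a b
    rw [Bool.eq_iff_iff]
    simp [Prod.Lex.lt_iff]
    omega
  rw [h]

lemma keyTI_inj : Function.Injective keyTI := by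
  intro a b h
  unfold keyTI at h
  have := congrArg (fun x => ofLex x) h
  simp at this
  exact Prod.ext this.2 this.1

-- the sorted foods are STRICTLY increasing in the key (indices are distinct)
lemma sTI_pairwise (ft : List Int) : (sTI ft).Pairwise (fun a b => keyTI a < keyTI b) := by
  have hle : (sTI ft).Pairwise (fun a b => keyTI a ≤ keyTI b) := PySem.List.sorted_pairwise _ _
  have hperm : (sTI ft).Perm (PySem.List.enumerate ft) := PySem.List.sorted_perm _ _ _
  have hnd : (sTI ft).Nodup := by
    refine hperm.nodup_iff.mpr ?_
    have := PySem.List.pairwise_lt_enumerate ft 0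
    exact this.imp (fun h => by intro he; rw [he] at h; exact lt_irrefl _ h)
  exact (hnd.and hle).imp (fun ⟨hne, hl⟩ => lt_of_le_of_ne hl (fun he => hne (keyTI_inj he)))

-- second components are nondecreasing along the sorted foods
lemma sTI_snd_pairwise (ft : List Int) : (sTI ft).Pairwise (fun a b => a.2 ≤ b.2) := by
  refine (sTI_pairwise ft).imp (fun {a b} h => ?_)
  unfold keyTI at h
  rw [Prod.Lex.lt_iff] at h
  simp at h
  rcases h with h | ⟨h, -⟩
  · exact le_of_lt h
  · exact le_of_eq h

-- the generator-sum fold is a mapped sum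
lemma costB_eq_sum (ft : List Int) (t : Int) : costB ft t = (ft.map (fun x => min x t)).sum := by
  unfold costB
  rw [PySem.List.foldl_add]
  simp

-- the cost read off A's sorted list
lemma costB_eq_sTI (ft : List Int) (t : Int) :
    costB ft t = ((sTI ft).map (fun x => min x.2 t)).sum := by
  rw [costB_eq_sum]
  have h1 : ft.map (fun x => min x t) = (PySem.List.enumerate ft).map (fun x => min x.2 t) := by
    conv_lhs => rw [← PySem.List.map_snd_enumerate ft 0]
    rw [List.map_map]
    rfl
  rw [h1]
  exact (List.Perm.sum_eq (List.Perm.map _ (PySem.List.sorted_perm _ _ _))).symm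

lemma costB_mono (ft : List Int) {a b : Int} (h : a ≤ b) : costB ft a ≤ costB ft b := by
  rw [costB_eq_sum, costB_eq_sum]
  exact List.sum_le_sum (fun x _ => min_le_min le_rfl h)

-- cost at a split point of the sorted list: prefix pays its own time, suffix pays t each
lemma costB_split (ft : List Int) (t : Int) (pre suf : List (Int × Int))
    (hs : sTI ft = pre ++ suf) (hpre : ∀ x ∈ pre, x.2 ≤ t) (hsuf : ∀ x ∈ suf, t ≤ x.2) :
    costB ft t = (pre.map (fun x => x.2)).sum + (suf.length : Int) * t := by
  rw [costB_eq_sTI, hs, List.map_append, List.sum_append]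
  congr 1
  · refine congrArg List.sum (List.map_congr_left (fun x hx => ?_))
    exact min_eq_left (hpre x hx)
  · have h1 : suf.map (fun x => min x.2 t) = suf.map (fun _ => t) :=
      List.map_congr_left (fun x hx => min_eq_right (hsuf x hx))
    rw [h1, List.map_const', List.sum_replicate, nsmul_eq_mul]

-- total food time = cost at the split (everything, nothing)
lemma total_eq_sum (ft : List Int) :
    ft.foldl (fun a t => a + t) 0 = ((sTI ft).map (fun x => x.2)).sum := by
  have h : ft.foldl (fun a t => a + t) 0 = (ft.map (fun x => x)).sum := by
    rw [PySem.List.foldl_add]; simp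
  rw [h]
  simp only [List.map_id_fun', id]
  have h1 : ft = (PySem.List.enumerate ft).map (fun x => x.2) := (PySem.List.map_snd_enumerate ft 0).symm
  conv_lhs => rw [h1]
  exact (List.Perm.sum_eq (List.Perm.map _ (PySem.List.sorted_perm _ _ _))).symm

-- the binary search returns the largest level whose cost fits
lemma bsearch_spec (ft : List Int) (k : Int) : ∀ (N : Nat) (lo hi : Int), (hi - lo).toNat ≤ N →
    costB ft lo ≤ k → k < costB ft hi → lo < hi →
    costB ft (bsearchB ft k lo hi) ≤ k ∧ k < costB ft (bsearchB ft k lo hi + 1) := by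
  intro N
  induction N with
  | zero => intro lo hi h1 _ _ h4; omega
  | succ N ih =>
    intro lo hi hN hlo hhi hlt
    rw [bsearchB]
    by_cases hgt : hi - lo > 1
    · rw [if_pos hgt]
      have hmid : lo < PySem.Int.floordiv (lo + hi) 2 ∧ PySem.Int.floordiv (lo + hi) 2 < hi := by
        rw [PySem.Int.floordiv_eq_ediv_of_pos (by omega : (0:Int) < 2)]
        omega
      set mid := PySem.Int.floordiv (lo + hi) 2 with hmdef
      by_cases hc : costB ft mid ≤ k
      · rw [if_pos hc]; exact ih mid hi (by omega) hc hhi hmid.2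
      · rw [if_neg hc]; exact ih lo mid (by omega) hlo (by omega) hmid.1
    · rw [if_neg hgt]
      have : hi = lo + 1 := by omega
      rw [← this]
      exact ⟨hlo, hhi⟩

-- the A loop completes (for-else) when k covers the whole remaining cost
lemma loopA_none (k : Int) : ∀ (suf : List (Int × Int)) (presum before : Int) (i : Nat),
    suf.Pairwise (fun a b => a.2 ≤ b.2) →
    presum + (suf.map (fun x => x.2)).sum ≤ k →
    solA_loop suf (k - presum - (suf.length : Int) * before) before (suf.length : Int) i = none := by
  intro suf
  induction suf with
  | nil => intro _ _ _ _ _; rfl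
  | cons x rest ihr =>
    intro presum before i hp hsum
    have hrest : ∀ y ∈ rest, x.2 ≤ y.2 := (List.pairwise_cons.mp hp).1
    have hrsum : (rest.length : Int) * x.2 ≤ (rest.map (fun y => y.2)).sum := by
      have h1 : (rest.map (fun _ => x.2)).sum ≤ (rest.map (fun y => y.2)).sum :=
        List.sum_le_sum (fun y hy => hrest y hy)
      rwa [List.map_const', List.sum_replicate, nsmul_eq_mul] at h1
    simp only [solA_loop, List.length_cons]
    have hcond : k - presum - ((rest.length : Int) + 1) * before ≥ ((rest.length : Int) + 1) * (x.2 - before) := by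
      simp only [List.map_cons, List.sum_cons] at hsum
      nlinarith
    rw [if_pos (by push_cast; linarith [hcond])]
    have harg : k - presum - ((rest.length : Int) + 1) * before - ((rest.length : Int) + 1) * (x.2 - before)
        = k - (presum + x.2) - (rest.length : Int) * x.2 := by ring
    have hlen : ((rest.length : Int) + 1) - 1 = (rest.length : Int) := by ring
    have := ihr (presum + x.2) x.2 (i + 1) (List.pairwise_cons.mp hp).2
      (by simp only [List.map_cons, List.sum_cons] at hsum ⊢; linarith)
    push_cast
    push_cast at harg hlen this
    rw [harg, hlen]
    exact this

-- the break position: the A loop started at a split point of the sorted list returns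
-- B's answer whenever the cost at level L fits but the cost at L+1 does not
lemma loopA_break (ft : List Int) (k L : Int)
    (hLle : costB ft L ≤ k) (hLgt : k < costB ft (L + 1)) :
    ∀ (suf pre : List (Int × Int)) (before : Int),
    sTI ft = pre ++ suf →
    (∀ x ∈ pre, x.2 ≤ L) →
    (match solA_loop suf (k - (pre.map (fun x => x.2)).sum - (suf.length : Int) * before) before (suf.length : Int) pre.length with
     | none => (-1 : Int)
     | some (i, kk) =>
        ((PySem.List.pyGet? (PySem.List.sorted2 ((sTI ft).drop i) (fun x => x.1) (fun x => x.2))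
          (PySem.Int.mod kk (PySem.List.len (PySem.List.sorted2 ((sTI ft).drop i) (fun x => x.1) (fun x => x.2))))).getD (0, 0)).1 + 1)
    = ansB ft k L := by
  intro suf
  induction suf with
  | nil =>
    intro pre before hs hpre
    exfalso
    have h1 : costB ft L = (pre.map (fun x => x.2)).sum := by
      have := costB_split ft L pre [] hs hpre (by simp)
      simpa using this
    have h2 : costB ft (L + 1) = (pre.map (fun x => x.2)).sum := by
      have := costB_split ft (L + 1) pre [] hs (fun x hx => le_trans (hpre x hx) (by omega)) (by simp)
      simpa using this
    omega
  | cons x rest ihr =>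
    intro pre before hs hpre
    have hp := sTI_snd_pairwise ft
    rw [hs] at hp
    rw [List.pairwise_append] at hp
    obtain ⟨hpreP, hsufP, hcross⟩ := hp
    have hprex : ∀ y ∈ pre, y.2 ≤ x.2 := fun y hy => hcross y hy x (List.mem_cons_self ..)
    have hsufx : ∀ y ∈ x :: rest, x.2 ≤ y.2 := by
      intro y hy
      rcases List.mem_cons.mp hy with h | h
      · rw [h]
      · exact (List.pairwise_cons.mp hsufP).1 y h
    set m : Int := ((x :: rest).length : Int) with hm
    have hcost_x : costB ft x.2 = (pre.map (fun y => y.2)).sum + m * x.2 :=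
      costB_split ft x.2 pre (x :: rest) hs hprex hsufx
    simp only [solA_loop]
    by_cases hx : x.2 ≤ L
    · -- eaten completely: the loop continues
      have hcont : k - (pre.map (fun y => y.2)).sum - m * before ≥ m * (x.2 - before) := by
        have := le_trans (costB_mono ft hx) hLle
        rw [hcost_x] at this
        nlinarith [this]
      rw [if_pos (by linarith [hcont])]
      have harg : k - (pre.map (fun y => y.2)).sum - m * before - m * (x.2 - before)
          = k - ((pre ++ [x]).map (fun y => y.2)).sum - (rest.length : Int) * x.2 := by
        simp only [List.map_append, List.sum_append, List.map_cons, List.map_nil, List.sum_cons,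
          List.sum_nil, hm, List.length_cons]
        push_cast
        ring
      have hlen : m - 1 = (rest.length : Int) := by simp [hm]
      have hilen : pre.length + 1 = (pre ++ [x]).length := by simp
      have := ihr (pre ++ [x]) x.2 (by rw [hs, List.append_cons])
        (by intro y hy
            rcases List.mem_append.mp hy with h | h
            · exact hpre y h
            · simp at h; rw [h]; exact hx)
      push_cast at harg hlen this ⊢
      rw [harg, hlen, hilen]
      exact this
    · -- first surviving food: the loop breaks here
      rw [not_le] at hx
      have hbreak : ¬ (k - (pre.map (fun y => y.2)).sum - m * before ≥ m * (x.2 - before)) := by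
        have h1 : costB ft (L + 1) ≤ costB ft x.2 := costB_mono ft (by omega)
        rw [hcost_x] at h1
        intro hcon
        nlinarith [lt_of_lt_of_le hLgt h1]
      rw [if_neg hbreak]
      -- the surviving suffix is exactly B's filter, second components all > L
      have hsufL : ∀ y ∈ x :: rest, L < y.2 := fun y hy => lt_of_lt_of_le hx (hsufx y hy)
      have hdrop : (sTI ft).drop pre.length = x :: rest := by
        rw [hs, List.drop_left]
      have hfilter : (sTI ft).filter (fun y => decide (L < y.2)) = x :: rest := by
        rw [hs, List.filter_append]
        have h1 : pre.filter (fun y => decide (L < y.2)) = [] := by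
          rw [List.filter_eq_nil_iff]
          intro y hy
          simp only [decide_eq_true_eq, not_lt]
          exact hpre y hy
        have h2 : (x :: rest).filter (fun y => decide (L < y.2)) = x :: rest := by
          rw [List.filter_eq_self]
          intro y hy
          simp only [decide_eq_true_eq]
          exact hsufL y hy
        rw [h1, h2, List.nil_append]
      have hperm : (survB ft L).Perm (x :: rest) := by
        rw [← hfilter]
        exact List.Perm.filter _ ((PySem.List.sorted_perm _ _ _).symm)
      -- A's second sort gives B's filtered list (both index-increasing perms of the suffix)
      have hsorted : PySem.List.sorted2 ((sTI ft).drop pre.length) (fun y => y.1) (fun y => y.2)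
          = survB ft L := by
        rw [hdrop, sorted2_eq_sorted_lex]
        apply PySem.List.sorted_eq_of_perm_of_pairwise_lt
        · exact hperm
        · have h := PySem.List.pairwise_lt_enumerate ft 0
          have hsub : (survB ft L).Pairwise (fun p q : Int × Int => p.1 < q.1) :=
            h.sublist List.filter_sublist
          exact hsub.imp (fun {a b} hab => by rw [Prod.Lex.lt_iff]; left; exact hab)
      simp only [hsorted]
      -- index arithmetic: kk ≡ k - costB ft L  (mod m), m = number of survivors > 0
      have hcost_L : costB ft L = (pre.map (fun y => y.2)).sum + m * L :=
        costB_split ft L pre (x :: rest) hs hpre (fun y hy => le_of_lt (hsufL y hy))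
      have hslen : ((survB ft L).length : Int) = m := by
        rw [hperm.length_eq]
      have hmpos : (0 : Int) < m := by simp [hm]
      unfold ansB
      have hmod : ∀ a : Int, PySem.Int.mod a ((survB ft L).length : Int) = a % ((survB ft L).length : Int) := by
        intro a
        rw [PySem.Int.mod_eq_emod_of_pos (by omega)]
      have hcongr : (k - (pre.map (fun y => y.2)).sum - m * before) % ((survB ft L).length : Int)
          = (k - costB ft L) % ((survB ft L).length : Int) := by
        rw [hcost_L, hslen]
        have h1 : k - (pre.map (fun y => y.2)).sum - m * before
            = (k - ((pre.map (fun y => y.2)).sum + m * L)) + m * (L - before) := by ring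
        rw [h1, Int.add_mul_emod_self_left]
      simp only [PySem.List.len_eq, List.length_map]
      rw [hmod, hmod, hcongr]
      set r := (k - costB ft L) % ((survB ft L).length : Int) with hrdef
      have hr0 : 0 ≤ r := Int.emod_nonneg _ (by omega)
      have hrm : r < ((survB ft L).length : Int) := Int.emod_lt_of_pos _ (by omega)
      have hrn : r.toNat < (survB ft L).length := by omega
      rw [PySem.List.pyGet?_of_nonneg _ hr0, PySem.List.pyGet?_of_nonneg _ hr0]
      rw [List.getElem?_map]
      simp [List.getElem?_eq_getElem hrn]

-- the single equality behind the claim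
lemma main_eq (ft : List Int) (k : Int) : solution ft k = solution_alt ft k := by
  by_cases hemp : ft = []
  · subst hemp; rfl
  · have hfoods : PySem.List.sorted2 (PySem.List.enumerate ft) (fun x => x.2) (fun x => x.1) = sTI ft := by
      rw [sorted2_eq_sorted_lex]; rfl
    have hslen : (sTI ft).length = ft.length := by
      unfold sTI
      rw [PySem.List.length_sorted, PySem.List.length_enumerate]
    by_cases htot : ft.foldl (fun a t => a + t) 0 ≤ k
    · -- everything gets eaten: both sides give -1
      have hnone := loopA_none k (sTI ft) 0 0 0 (sTI_snd_pairwise ft)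
        (by rw [total_eq_sum] at htot; simpa using htot)
      unfold solution solution_alt
      rw [if_pos (Or.inr htot)]
      rw [hfoods]
      simp only [PySem.List.len_eq, hslen]
      rw [← hslen]
      have hnone' : solA_loop (sTI ft) k 0 ((sTI ft).length : Int) 0 = none := by simpa using hnone
      rw [hnone']
    · -- someone survives: the loop breaks at level L found by the binary search
      obtain ⟨mn, hmn⟩ : ∃ mn, PySem.List.min? ft (fun x => x) = some mn := by
        cases h : PySem.List.min? ft (fun x => x) with
        | none => exact absurd ((PySem.List.min?_eq_none_iff _ _).mp h) hemp
        | some m => exact ⟨m, rfl⟩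
      obtain ⟨mx, hmx⟩ : ∃ mx, PySem.List.max? ft (fun x => x) = some mx := by
        cases h : PySem.List.max? ft (fun x => x) with
        | none => exact absurd ((PySem.List.max?_eq_none_iff _ _).mp h) hemp
        | some m => exact ⟨m, rfl⟩
      have hn : (0 : Int) < (ft.length : Int) := by
        have : ft.length ≠ 0 := fun h => hemp (List.eq_nil_of_length_eq_zero h)
        omega
      have hsnd_mem : ∀ x ∈ sTI ft, x.2 ∈ ft := by
        intro x hx
        have h1 : x ∈ PySem.List.enumerate ft := (PySem.List.mem_sorted _ _ _ _).mp hx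
        rw [PySem.List.mem_enumerate_iff] at h1
        obtain ⟨j, hj, hx2⟩ := h1
        rw [hx2]
        exact List.getElem_mem hj
      set lo := min mn (PySem.Int.floordiv k (PySem.List.len ft)) with hlo
      have hlen_eq : PySem.List.len ft = (ft.length : Int) := PySem.List.len_eq ft
      have hclo : costB ft lo ≤ k := by
        have hsplit : costB ft lo = ((([] : List (Int × Int))).map (fun x => x.2)).sum + ((sTI ft).length : Int) * lo := by
          refine costB_split ft lo [] (sTI ft) (by simp) (by simp) ?_
          intro x hx
          calc lo ≤ mn := min_le_left _ _
          _ ≤ x.2 := PySem.List.min?_isMin hmn x.2 (hsnd_mem x hx)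
        have hfd : PySem.Int.floordiv k (ft.length : Int) * (ft.length : Int) ≤ k := by
          have h1 := PySem.Int.floordiv_mul_add_mod k (ft.length : Int)
          have h2 : 0 ≤ PySem.Int.mod k (ft.length : Int) := by
            rw [PySem.Int.mod_eq_emod_of_pos hn]
            exact Int.emod_nonneg _ (by omega)
          omega
        rw [hsplit, hslen]
        simp only [List.map_nil, List.sum_nil, zero_add]
        have hlofd : lo ≤ PySem.Int.floordiv k (ft.length : Int) := by
          rw [hlo, hlen_eq]
          exact min_le_right _ _
        calc (ft.length : Int) * lo ≤ (ft.length : Int) * PySem.Int.floordiv k (ft.length : Int) :=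
              mul_le_mul_of_nonneg_left hlofd (by omega)
        _ = PySem.Int.floordiv k (ft.length : Int) * (ft.length : Int) := mul_comm _ _
        _ ≤ k := hfd
      have hchi : k < costB ft mx := by
        have hsplit : costB ft mx = ((sTI ft).map (fun x => x.2)).sum + (([] : List (Int × Int)).length : Int) * mx := by
          refine costB_split ft mx (sTI ft) [] (by simp) ?_ (by simp)
          intro x hx
          exact PySem.List.max?_isMax hmx x.2 (hsnd_mem x hx)
        rw [hsplit, ← total_eq_sum]
        simpa using htot
      have hlohi : lo < mx := by
        have hle : lo ≤ mx := by
          have h1 : mn ∈ ft := PySem.List.min?_mem hmn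
          calc lo ≤ mn := min_le_left _ _
          _ ≤ mx := PySem.List.max?_isMax hmx mn h1
        rcases lt_or_eq_of_le hle with h | h
        · exact h
        · exfalso; rw [h] at hclo; omega
      set L := bsearchB ft k lo mx with hLdef
      have hLspec := bsearch_spec ft k (mx - lo).toNat lo mx le_rfl hclo hchi hlohi
      have hbr := loopA_break ft k L hLspec.1 hLspec.2 (sTI ft) [] 0 (by simp) (by simp)
      -- right side: B computes ansB ft k L
      have hR : solution_alt ft k = ansB ft k L := by
        unfold solution_alt
        rw [if_neg (by
          intro hcon
          rcases hcon with h | h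
          · exact hemp (List.isEmpty_iff.mp h)
          · exact htot h)]
        rw [hmn, hmx]
        simp only [Option.getD_some]
        rfl
      -- left side: A's loop lands on the same value
      have hL : solution ft k = ansB ft k L := by
        unfold solution
        rw [hfoods]
        simp only [List.map_nil, List.sum_nil, List.length_nil, sub_zero, mul_zero,
          PySem.List.len_eq] at hbr ⊢
        exact hbr
      rw [hL, hR]

-- ===== VERDICT (by name: the statement is the Claim_ definition above) =====
theorem solution_spec : Claim_equal_solution := by
  unfold Claim_equal_solution Spec_solution
  intro ft k _
  exact main_eq ft k
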